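-- pv_equiv track=rewrite | github.com/Muzque/Leetcode | AlgoExpert/strings/underscorifySubstring.py | cut_recursive_string
-- ===== SOURCE A (Python) =====
-- def cut_recursive_string(i, string, substring, ret):
--     span = len(substring)
--     if i+span > len(string) or span == 0:
--         return ret
--     cut = string[i:i+span]
--     if cut == substring:
--         ret += substring
--         return cut_recursive_string(i+span, string, substring, ret)
--     return ret
-- ===== SOURCE B (Python) =====
-- def cut_recursive_string(i, string, substring, ret):
--     span = len(substring)
--     if span == 0:
--         return ret
--     while i + span <= len(string) and string[i:i+span] == substring:
--         ret += substring
--         i += span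
--     return ret
-- ===== Notes on version B (the rewrite author's own statement) =====
-- stated objective: simpler
-- what changed: Replaces A's tail recursion (which rebuilds a call frame per occurrence and re-tests span==0 each call) by a single guard 'if span == 0: return ret' followed by a plain while loop over the same index i and accumulator ret.
import Mathlib
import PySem

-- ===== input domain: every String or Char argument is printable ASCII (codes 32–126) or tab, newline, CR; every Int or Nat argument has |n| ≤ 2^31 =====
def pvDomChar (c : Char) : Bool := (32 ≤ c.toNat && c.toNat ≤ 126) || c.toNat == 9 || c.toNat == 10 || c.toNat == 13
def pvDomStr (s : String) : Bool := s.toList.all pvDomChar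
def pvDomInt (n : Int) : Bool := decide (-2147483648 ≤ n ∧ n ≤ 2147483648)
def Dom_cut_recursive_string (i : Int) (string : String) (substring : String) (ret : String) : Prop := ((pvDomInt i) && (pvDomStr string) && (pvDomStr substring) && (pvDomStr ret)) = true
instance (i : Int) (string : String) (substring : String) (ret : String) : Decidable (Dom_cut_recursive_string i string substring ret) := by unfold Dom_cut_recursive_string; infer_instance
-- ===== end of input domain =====

-- B replaces A's tail recursion by a guarded while loop over the same index and accumulator (objective: simpler).

-- ===== PORT A =====
-- Literal transliteration of A's tail recursion; string slicing via PySem.List.slice on toList.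
def cut_recursive_string (i : Int) (string : String) (substring : String) (ret : String) : String :=
  if h : i + (substring.toList.length : Int) > (string.toList.length : Int) ∨ (substring.toList.length : Int) = 0 then
    ret
  else
    let cut := PySem.List.slice string.toList (some i) (some (i + (substring.toList.length : Int)))
    if cut = substring.toList then
      cut_recursive_string (i + (substring.toList.length : Int)) string substring (ret ++ substring)
    else ret
termination_by ((string.toList.length : Int) + 1 - i).toNat
decreasing_by
  rw [not_or] at h
  omega

-- ===== PORT B =====
-- the while loop of Source B (hs is only a totality guard; the Python loop has no such test)
def cut_loop (string : String) (substring : String) (hs : substring.toList ≠ []) (i : Int) (ret : String) : String :=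
  if h : i + (substring.toList.length : Int) ≤ (string.toList.length : Int) ∧
         PySem.List.slice string.toList (some i) (some (i + (substring.toList.length : Int))) = substring.toList then
    cut_loop string substring hs (i + (substring.toList.length : Int)) (ret ++ substring)
  else ret
termination_by ((string.toList.length : Int) + 1 - i).toNat
decreasing_by
  have : substring.toList.length ≠ 0 := fun hz => hs (List.eq_nil_of_length_eq_zero hz)
  omega

def cut_recursive_string_alt (i : Int) (string : String) (substring : String) (ret : String) : String :=
  if hs : substring.toList = [] then ret
  else cut_loop string substring hs i ret

-- ===== PRECONDITION & SPEC =====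
def Spec_cut_recursive_string (i : Int) (string : String) (substring : String) (ret : String) (out : String) : Prop := out = cut_recursive_string_alt i string substring ret
instance (i : Int) (string : String) (substring : String) (ret : String) (out : String) : Decidable (Spec_cut_recursive_string i string substring ret out) := by unfold Spec_cut_recursive_string; infer_instance

-- ===== CLAIM (what is proved, stated in full; the proofs are below) =====
def Claim_equal_cut_recursive_string : Prop := ∀ (i : Int) (string : String) (substring : String) (ret : String), Dom_cut_recursive_string i string substring ret → Spec_cut_recursive_string i string substring ret (cut_recursive_string i string substring ret)

-- ===== LEMMAS AND PROOFS =====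

lemma cut_eq_loop (string substring : String) (hs : substring.toList ≠ []) :
    ∀ (i : Int) (ret : String),
      cut_recursive_string i string substring ret = cut_loop string substring hs i ret := by
  intro i ret
  rw [cut_recursive_string, cut_loop]
  have hlen : substring.toList.length ≠ 0 := fun hz => hs (List.eq_nil_of_length_eq_zero hz)
  split_ifs with h1 h2 h2
  · exfalso; rcases h1 with h | h <;> omega
  · rfl
  · rw [not_or] at h1
    show (if PySem.List.slice string.toList (some i) (some (i + (substring.toList.length : Int))) = substring.toList then
        cut_recursive_string (i + (substring.toList.length : Int)) string substring (ret ++ substring) else ret) = _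
    rw [if_pos h2.2]
    exact cut_eq_loop string substring hs (i + (substring.toList.length : Int)) (ret ++ substring)
  · rw [not_or] at h1
    show (if PySem.List.slice string.toList (some i) (some (i + (substring.toList.length : Int))) = substring.toList then
        cut_recursive_string (i + (substring.toList.length : Int)) string substring (ret ++ substring) else ret) = ret
    have h3 : ¬ PySem.List.slice string.toList (some i) (some (i + (substring.toList.length : Int))) = substring.toList := by
      intro hc; exact h2 ⟨by omega, hc⟩
    rw [if_neg h3]
termination_by i => ((string.toList.length : Int) + 1 - i).toNat
decreasing_by
  rw [not_or] at h1
  have : substring.toList.length ≠ 0 := fun hz => hs (List.eq_nil_of_length_eq_zero hz)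
  omega

-- ===== VERDICT (by name: the statement is the Claim_ definition above) =====
theorem cut_recursive_string_spec : Claim_equal_cut_recursive_string := by
  intro i string substring ret _
  unfold Spec_cut_recursive_string cut_recursive_string_alt
  split_ifs with hs
  · have hc : i + (substring.toList.length : Int) > (string.toList.length : Int) ∨ (substring.toList.length : Int) = 0 :=
      Or.inr (by simp [hs])
    rw [cut_recursive_string, dif_pos hc]
  · exact cut_eq_loop string substring hs i ret
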